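-- pv_equiv track=rewrite | github.com/kreslotim/Wall-SLAM | laptopSide/move_car.py | move_car
-- ===== SOURCE A (Python) =====
-- def move_car(start_pos, suggested_path):
--     x, y = start_pos
--     nodes = [(x, y)]
--     direction = None
--     scale_factor=10;
--
--     for move in suggested_path:
--         if move == 'right':
--             if direction != 'right':
--                 nodes.append((x + scale_factor, y))
--                 direction = 'right'
--             x += scale_factor
--         elif move == 'down':
--             if direction != 'down':
--                 nodes.append((x, y -scale_factor))
--                 direction = 'down'
--             y -= scale_factor
--         elif move == 'left':
--             if direction != 'left':
--                 nodes.append((x - scale_factor, y))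
--                 direction = 'left'
--             x -= scale_factor
--         elif move == 'up':
--             if direction != 'up':
--                 nodes.append((x, y + scale_factor))
--                 direction = 'up'
--             y += scale_factor
--
--     return nodes
-- ===== SOURCE B (Python) =====
-- def move_car(start_pos, suggested_path):
--     STEP = {'right': (10, 0), 'down': (0, -10), 'left': (-10, 0), 'up': (0, 10)}
--     moves = [m for m in suggested_path if m in STEP]
--     x, y = start_pos
--     nodes = [(x, y)]
--     i, n = 0, len(moves)
--     while i < n:
--         j = i
--         while j < n and moves[j] == moves[i]:
--             j += 1
--         dx, dy = STEP[moves[i]]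
--         nodes.append((x + dx, y + dy))
--         x += (j - i) * dx
--         y += (j - i) * dy
--         i = j
--     return nodes
-- ===== Notes on version B (the rewrite author's own statement) =====
-- stated objective: alternative
-- what changed: B filters out unrecognised moves, then emits one node per maximal run of equal moves (run-length decomposition with an explicit two-index scan and a step table), instead of A's per-move state machine carrying a direction flag.
import Mathlib
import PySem

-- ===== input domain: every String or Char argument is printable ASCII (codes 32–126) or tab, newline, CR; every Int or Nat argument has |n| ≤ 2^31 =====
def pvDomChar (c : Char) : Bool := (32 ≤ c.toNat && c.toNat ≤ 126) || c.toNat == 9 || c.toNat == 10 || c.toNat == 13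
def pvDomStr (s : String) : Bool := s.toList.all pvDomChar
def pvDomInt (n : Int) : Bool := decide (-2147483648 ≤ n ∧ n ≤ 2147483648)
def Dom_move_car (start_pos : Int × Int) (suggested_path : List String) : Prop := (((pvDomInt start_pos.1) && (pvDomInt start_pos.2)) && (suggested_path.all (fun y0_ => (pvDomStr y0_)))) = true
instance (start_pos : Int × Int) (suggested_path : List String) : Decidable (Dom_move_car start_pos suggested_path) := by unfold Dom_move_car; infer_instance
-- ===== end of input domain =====

-- B replaces A's per-move state machine by filtering out unknown moves and then emitting one
-- node per maximal run of equal moves (run-length decomposition); same return value, no mutation.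

-- ===== PORT A =====
-- the loop body of A: state is (x, y, nodes, direction)
def pvStepA (s : Int × Int × List (Int × Int) × Option String) (move : String) :
    Int × Int × List (Int × Int) × Option String :=
  let (x, y, nodes, direction) := s
  if move = "right" then
    if direction ≠ some "right" then (x + 10, y, nodes ++ [(x + 10, y)], some "right")
    else (x + 10, y, nodes, direction)
  else if move = "down" then
    if direction ≠ some "down" then (x, y - 10, nodes ++ [(x, y - 10)], some "down")
    else (x, y - 10, nodes, direction)
  else if move = "left" then
    if direction ≠ some "left" then (x - 10, y, nodes ++ [(x - 10, y)], some "left")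
    else (x - 10, y, nodes, direction)
  else if move = "up" then
    if direction ≠ some "up" then (x, y + 10, nodes ++ [(x, y + 10)], some "up")
    else (x, y + 10, nodes, direction)
  else s

def move_car (start_pos : Int × Int) (suggested_path : List String) : List (Int × Int) :=
  (suggested_path.foldl pvStepA
    (start_pos.1, start_pos.2, [(start_pos.1, start_pos.2)], none)).2.2.1

-- ===== PORT B =====
-- B's STEP table
def pvStep? (m : String) : Option (Int × Int) :=
  if m = "right" then some (10, 0)
  else if m = "down" then some (0, -10)
  else if m = "left" then some (-10, 0)
  else if m = "up" then some (0, 10)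
  else none

-- B's while loop: consume one maximal run of equal moves per iteration
def pvRuns : Int → Int → List String → List (Int × Int)
  | _, _, [] => []
  | x, y, m :: rest =>
    let run := rest.takeWhile (· = m)
    let rest' := rest.dropWhile (· = m)
    let (dx, dy) := (pvStep? m).getD (0, 0)
    let k : Int := (run.length : Int) + 1
    (x + dx, y + dy) :: pvRuns (x + k * dx) (y + k * dy) rest'
termination_by _ _ l => l.length
decreasing_by
  simp only [List.length_cons]
  exact Nat.lt_succ_of_le (List.length_dropWhile_le _ _)

def move_car_alt (start_pos : Int × Int) (suggested_path : List String) : List (Int × Int) :=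
  let moves := suggested_path.filter (fun m => (pvStep? m).isSome)
  (start_pos.1, start_pos.2) :: pvRuns start_pos.1 start_pos.2 moves

-- ===== PRECONDITION & SPEC =====
def Spec_move_car (start_pos : Int × Int) (suggested_path : List String) (out : List (Int × Int)) : Prop := out = move_car_alt start_pos suggested_path
instance (start_pos : Int × Int) (suggested_path : List String) (out : List (Int × Int)) : Decidable (Spec_move_car start_pos suggested_path out) := by unfold Spec_move_car; infer_instance

-- ===== CLAIM (what is proved, stated in full; the proofs are below) =====
def Claim_equal_move_car : Prop := ∀ (start_pos : Int × Int) (suggested_path : List String), Dom_move_car start_pos suggested_path → Spec_move_car start_pos suggested_path (move_car start_pos suggested_path)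

-- ===== LEMMAS AND PROOFS =====

-- an unrecognised move is a no-op for A's loop body
theorem pvStepA_invalid (s : Int × Int × List (Int × Int) × Option String) (m : String)
    (h : pvStep? m = none) : pvStepA s m = s := by
  obtain ⟨x, y, nodes, d⟩ := s
  simp only [pvStep?] at h
  split_ifs at h <;> simp_all [pvStepA]

-- A's fold is unchanged by dropping unrecognised moves
theorem foldA_filter (l : List String) (s : Int × Int × List (Int × Int) × Option String) :
    l.foldl pvStepA s = (l.filter (fun m => (pvStep? m).isSome)).foldl pvStepA s := by
  induction l generalizing s with
  | nil => rfl
  | cons m rest ih =>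
    by_cases h : (pvStep? m).isSome
    · simp [List.filter_cons, h, List.foldl_cons, ih]
    · have hn : pvStep? m = none := by
        cases hh : pvStep? m <;> simp_all
      simp [List.filter_cons, h, List.foldl_cons, pvStepA_invalid s m hn, ih]

-- A's loop body on a valid move whose direction differs from the carried one
theorem pvStepA_turn (x y : Int) (acc : List (Int × Int)) (d : Option String)
    (m : String) (dx dy : Int) (h : pvStep? m = some (dx, dy)) (hd : d ≠ some m) :
    pvStepA (x, y, acc, d) m = (x + dx, y + dy, acc ++ [(x + dx, y + dy)], some m) := by
  simp only [pvStep?] at h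
  split_ifs at h with h1 h2 h3 h4 <;>
    simp_all [pvStepA] <;> omega
-- A's loop body on a valid move equal to the carried direction
theorem pvStepA_same (x y : Int) (acc : List (Int × Int))
    (m : String) (dx dy : Int) (h : pvStep? m = some (dx, dy)) :
    pvStepA (x, y, acc, some m) m = (x + dx, y + dy, acc, some m) := by
  simp only [pvStep?] at h
  split_ifs at h with h1 h2 h3 h4 <;>
    simp_all [pvStepA] <;> omega

-- folding A's body over a run of copies of m just advances the position
theorem foldA_run (run : List String) (m : String) (dx dy : Int)
    (h : pvStep? m = some (dx, dy)) (hall : ∀ m' ∈ run, m' = m) :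
    ∀ (x y : Int) (acc : List (Int × Int)),
    run.foldl pvStepA (x, y, acc, some m) =
      (x + (run.length : Int) * dx, y + (run.length : Int) * dy, acc, some m) := by
  induction run with
  | nil => intro x y acc; simp
  | cons a rest ih =>
    intro x y acc
    have ha : a = m := hall a (by simp)
    subst ha
    rw [List.foldl_cons, pvStepA_same x y acc a dx dy h,
      ih (fun m' hm => hall m' (by simp [hm]))]
    simp only [List.length_cons, Prod.mk.injEq, Nat.cast_add, Nat.cast_one,
      and_true, true_and]
    constructor <;> ring

-- head of dropWhile fails the predicate
theorem head_dropWhile {α : Type} (p : α → Bool) (l : List α) (a : α)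
    (h : (l.dropWhile p).head? = some a) : p a = false := by
  induction l with
  | nil => simp [List.dropWhile] at h
  | cons b rest ih =>
    rw [List.dropWhile_cons] at h
    split at h
    · exact ih h
    · simp_all

-- core: on a list of valid moves whose head differs from the carried direction,
-- A's fold appends exactly B's run nodes
theorem core (ms : List String) (x y : Int) (acc : List (Int × Int)) (d : Option String)
    (hv : ∀ m ∈ ms, (pvStep? m).isSome)
    (hd : ∀ m, ms.head? = some m → d ≠ some m) :
    (ms.foldl pvStepA (x, y, acc, d)).2.2.1 = acc ++ pvRuns x y ms := by
  match ms with
  | [] => simp [pvRuns]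
  | m :: rest =>
    obtain ⟨⟨dx, dy⟩, hstep⟩ := Option.isSome_iff_exists.mp (hv m (by simp))
    have hsplit : rest = rest.takeWhile (· = m) ++ rest.dropWhile (· = m) :=
      (List.takeWhile_append_dropWhile).symm
    have hallrun : ∀ m' ∈ rest.takeWhile (· = m), m' = m := by
      intro m' hm'
      have := List.mem_takeWhile_imp hm'
      simpa using this
    rw [List.foldl_cons, pvStepA_turn x y acc d m dx dy hstep (hd m rfl)]
    conv_lhs => rw [hsplit]
    rw [List.foldl_append, foldA_run _ m dx dy hstep hallrun]
    have hvrest : ∀ m' ∈ rest.dropWhile (· = m), (pvStep? m').isSome := by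
      intro m' hm'
      exact hv m' (by
        right
        exact (List.dropWhile_sublist _).mem hm')
    have hdrest : ∀ m', (rest.dropWhile (· = m)).head? = some m' → (some m : Option String) ≠ some m' := by
      intro m' hm' hsome
      have := head_dropWhile (· = m) rest m' hm'
      simp at this
      exact this (by simpa using hsome.symm)
    rw [core (rest.dropWhile (· = m)) _ _ _ (some m) hvrest hdrest, pvRuns]
    simp only [hstep, Option.getD_some, List.singleton_append, List.append_assoc]
    have hx : x + dx + ((rest.takeWhile (· = m)).length : Int) * dx
        = x + (((rest.takeWhile (· = m)).length : Int) + 1) * dx := by ring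
    have hy : y + dy + ((rest.takeWhile (· = m)).length : Int) * dy
        = y + (((rest.takeWhile (· = m)).length : Int) + 1) * dy := by ring
    rw [hx, hy]
termination_by ms.length
decreasing_by
  simp only [List.length_cons]
  exact Nat.lt_succ_of_le (List.length_dropWhile_le _ _)

-- ===== VERDICT (by name: the statement is the Claim_ definition above) =====
theorem move_car_spec : Claim_equal_move_car := by
  intro sp path _
  show move_car sp path = move_car_alt sp path
  unfold move_car move_car_alt
  rw [foldA_filter]
  rw [core _ sp.1 sp.2 _ none (by simp [List.mem_filter]) (by intro m _ h; cases h)]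
  rfl
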